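-- pv_equiv track=rewrite | github.com/homebrew9/leetcode_solutions | algorithms/easy/check_if_all_1s_are_atleast_length_k_places_away.py | kLengthApart
-- ===== SOURCE A (Python) =====
-- from typing import List
--
-- def kLengthApart(nums: List[int], k: int) -> bool:
--     prev = None
--     for i, n in enumerate(nums):
--         if n == 1:
--             if prev is None or (i - prev) > k:
--                 prev = i
--             else:
--                 return False
--     return True
-- ===== SOURCE B (Python) =====
-- def kLengthApart(nums, k):
--     # brute-force window check: for each 1, no other 1 may appear in the next k cells
--     w = max(k, 0)
--     for i in range(len(nums)):
--         if nums[i] == 1 and 1 in nums[i + 1 : i + 1 + w]: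
--             return False
--     return True
-- ===== Notes on version B (the rewrite author's own statement) =====
-- stated objective: alternative
-- what changed: Replaces A's stateful scan that tracks the previous 1's index and compares index gaps with a brute-force window check: for each position holding a 1, test membership of 1 in the slice of the next k elements; no state is carried between iterations.
import Mathlib
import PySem

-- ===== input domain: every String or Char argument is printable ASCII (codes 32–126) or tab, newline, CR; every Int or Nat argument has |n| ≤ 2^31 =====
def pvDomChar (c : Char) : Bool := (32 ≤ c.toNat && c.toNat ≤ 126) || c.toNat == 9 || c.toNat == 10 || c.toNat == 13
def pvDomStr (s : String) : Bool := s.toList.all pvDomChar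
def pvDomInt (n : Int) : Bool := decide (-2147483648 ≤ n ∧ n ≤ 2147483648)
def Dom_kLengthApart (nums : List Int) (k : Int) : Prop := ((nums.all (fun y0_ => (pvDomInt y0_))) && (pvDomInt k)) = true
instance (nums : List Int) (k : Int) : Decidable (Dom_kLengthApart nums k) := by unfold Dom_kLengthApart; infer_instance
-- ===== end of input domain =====

-- B replaces A's stateful scan (tracking the previous 1's index) with a stateless
-- brute-force window check: for each 1, test whether another 1 occurs in the next k cells.

-- ===== PORT A =====
-- A's loop over enumerate(nums), carrying prev : Option Int; early `return False` becomes the `false` branch.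
def kLengthApartLoop (k : Int) : List (Int × Int) → Option Int → Bool
  | [], _ => true
  | (i, n) :: rest, prev =>
    if n = 1 then
      if prev.isNone || decide (i - prev.getD 0 > k) then kLengthApartLoop k rest (some i)
      else false
    else kLengthApartLoop k rest prev

def kLengthApart (nums : List Int) (k : Int) : Bool :=
  kLengthApartLoop k (PySem.List.enumerate nums) none

-- ===== PORT B =====
-- B's loop 'for i in range(len(nums))' with the early return; the slice is nums[i+1:i+1+w]
def kLengthApartAltGo (nums : List Int) (k : Int) : List Int → Bool
  | [] => true
  | i :: rest =>
    if PySem.List.pyGetD nums i 0 = 1 ∧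
        (PySem.List.slice nums (some (i + 1)) (some (i + 1 + max k 0))).contains 1 then
      false
    else kLengthApartAltGo nums k rest

def kLengthApart_alt (nums : List Int) (k : Int) : Bool :=
  kLengthApartAltGo nums k (PySem.List.pyRange 0 nums.length 1)

-- ===== PRECONDITION & SPEC =====
def Spec_kLengthApart (nums : List Int) (k : Int) (out : Bool) : Prop := out = kLengthApart_alt nums k
instance (nums : List Int) (k : Int) (out : Bool) : Decidable (Spec_kLengthApart nums k out) := by unfold Spec_kLengthApart; infer_instance

-- ===== CLAIM (what is proved, stated in full; the proofs are below) =====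
def Claim_equal_kLengthApart : Prop := ∀ (nums : List Int) (k : Int), Dom_kLengthApart nums k → Spec_kLengthApart nums k (kLengthApart nums k)

-- ===== LEMMAS AND PROOFS =====

-- proof-side helpers: the (increasing) list of indices of 1s, and A's gap scan over it
def onesPos (nums : List Int) : List Int :=
  (PySem.List.enumerate nums).filterMap (fun pr => if pr.2 = 1 then some pr.1 else none)

def gapsApart (k : Int) : List Int → Bool
  | p :: q :: rest => if q - p ≤ k then false else gapsApart k (q :: rest)
  | _ => true

-- A's loop from state prev equals the gap scan on (prev's index consed onto) the remaining 1-indices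
theorem kLengthApartLoop_eq_gaps (k : Int) (l : List (Int × Int)) :
    ∀ prev : Option Int,
      kLengthApartLoop k l prev =
        gapsApart k ((prev.toList) ++ l.filterMap (fun pr => if pr.2 = 1 then some pr.1 else none)) := by
  induction l with
  | nil =>
    intro prev
    cases prev <;> simp [kLengthApartLoop, gapsApart]
  | cons hd tl ih =>
    intro prev
    obtain ⟨i, n⟩ := hd
    cases prev with
    | none =>
      by_cases hn : n = 1 <;> simp [kLengthApartLoop, hn, ih]
    | some p =>
      by_cases hn : n = 1
      · by_cases hk : i - p > k
        · simp [kLengthApartLoop, hn, hk, ih, gapsApart, not_le.mpr hk]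
        · simp [kLengthApartLoop, hn, hk, gapsApart, not_lt.mp hk]
      · simp [kLengthApartLoop, hn, ih]

-- membership in the 1-index list of an enumerate suffix
theorem mem_filterMap_enumerate (xs : List Int) :
    ∀ (s i : Int),
      (i ∈ (PySem.List.enumerate xs s).filterMap (fun pr => if pr.2 = 1 then some pr.1 else none)) ↔
        ∃ t : Nat, ∃ _ : t < xs.length, i = s + t ∧ xs[t] = 1 := by
  induction xs with
  | nil => intro s i; simp [PySem.List.enumerate_nil]
  | cons x xs ih =>
    intro s i
    by_cases hx : x = 1
    · subst hx
      simp only [PySem.List.enumerate_cons, List.filterMap_cons, reduceIte, List.mem_cons, ih]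
      constructor
      · rintro (rfl | ⟨t, ht, rfl, h⟩)
        · exact ⟨0, by simp, by simp, by simp⟩
        · exact ⟨t + 1, by simpa using ht, by push_cast; ring, by simpa using h⟩
      · rintro ⟨t, ht, rfl, h⟩
        cases t with
        | zero => left; simp
        | succ t =>
          right
          exact ⟨t, by simpa using ht, by push_cast; ring, by simpa using h⟩
    · simp only [PySem.List.enumerate_cons, List.filterMap_cons, hx, if_false, ih]
      constructor
      · rintro ⟨t, ht, rfl, h⟩
        exact ⟨t + 1, by simpa using ht, by push_cast; ring, by simpa using h⟩
      · rintro ⟨t, ht, rfl, h⟩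
        cases t with
        | zero => simp at h; exact absurd h hx
        | succ t =>
          exact ⟨t, by simpa using ht, by push_cast; ring, by simpa using h⟩

theorem mem_onesPos (nums : List Int) (i : Int) :
    i ∈ onesPos nums ↔ 0 ≤ i ∧ i < nums.length ∧ PySem.List.pyGetD nums i 0 = 1 := by
  unfold onesPos
  rw [mem_filterMap_enumerate]
  constructor
  · rintro ⟨t, ht, rfl, h⟩
    refine ⟨by omega, by omega, ?_⟩
    rw [PySem.List.pyGetD_eq_getElem _ _ (by omega) (by omega)]
    have : ((0 : Int) + t).toNat = t := by omega
    simpa [this] using h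
  · rintro ⟨h0, h1, h2⟩
    refine ⟨i.toNat, by omega, by omega, ?_⟩
    rw [PySem.List.pyGetD_eq_getElem _ _ h0 h1] at h2
    exact h2

theorem sorted_filterMap_enumerate (xs : List Int) :
    ∀ s : Int,
      ((PySem.List.enumerate xs s).filterMap (fun pr => if pr.2 = 1 then some pr.1 else none)).Pairwise (· < ·) := by
  induction xs with
  | nil => intro s; simp [PySem.List.enumerate_nil]
  | cons x xs ih =>
    intro s
    by_cases hx : x = 1
    · subst hx
      simp only [PySem.List.enumerate_cons, List.filterMap_cons, reduceIte]
      refine List.pairwise_cons.mpr ⟨?_, ih (s + 1)⟩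
      intro y hy
      obtain ⟨t, ht, rfl, -⟩ := (mem_filterMap_enumerate xs (s + 1) y).mp hy
      omega
    · simpa only [PySem.List.enumerate_cons, List.filterMap_cons, hx, if_false] using ih (s + 1)

theorem sorted_onesPos (nums : List Int) : (onesPos nums).Pairwise (· < ·) := by
  unfold onesPos
  exact sorted_filterMap_enumerate nums 0

-- the gap scan is the chain condition on consecutive elements
theorem gapsApart_eq_chain (k : Int) (l : List Int) :
    gapsApart k l = true ↔ l.IsChain (fun p q => k < q - p) := by
  induction l with
  | nil => simp [gapsApart]
  | cons p tl ih =>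
    cases tl with
    | nil => simp [gapsApart]
    | cons q rest =>
      constructor
      · intro hg
        have hgap : ¬(q - p ≤ k) := by
          by_contra hk
          simp [gapsApart, hk] at hg
        rw [List.isChain_cons_cons]
        refine ⟨by omega, ih.mp ?_⟩
        simpa [gapsApart, hgap] using hg
      · intro hc
        rw [List.isChain_cons_cons] at hc
        have hgap : ¬(q - p ≤ k) := by omega
        simpa [gapsApart, hgap] using ih.mpr hc.2

-- on a strictly increasing list the chain condition equals the pairwise condition
theorem chain_iff_pairwise_gap (k : Int) (l : List Int) (hs : l.Pairwise (· < ·)) :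
    l.IsChain (fun p q => k < q - p) ↔ l.Pairwise (fun p q => k < q - p) := by
  induction l with
  | nil => simp
  | cons p tl ih =>
    obtain ⟨hhead, hs'⟩ := List.pairwise_cons.mp hs
    rw [List.isChain_cons, List.pairwise_cons, ih hs']
    constructor
    · rintro ⟨hh, hp⟩
      refine ⟨?_, hp⟩
      intro b hb
      cases tl with
      | nil => simp at hb
      | cons q rest =>
        have hpq : k < q - p := hh q (by simp)
        rcases List.mem_cons.mp hb with rfl | hb'
        · exact hpq
        · have hqb : k < b - q := (List.pairwise_cons.mp hp).1 b hb'
          have hq : p < q := hhead q (by simp)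
          omega
    · rintro ⟨hall, hp⟩
      exact ⟨fun y hy => hall y (List.mem_of_mem_head? hy), hp⟩

-- on a strictly increasing list the pairwise condition is the symmetric "all pairs" condition
theorem pairwise_iff_forall_lt (k : Int) (l : List Int) (hs : l.Pairwise (· < ·)) :
    l.Pairwise (fun p q => k < q - p) ↔ ∀ a ∈ l, ∀ b ∈ l, a < b → k < b - a := by
  induction l with
  | nil => simp
  | cons p tl ih =>
    obtain ⟨hhead, hs'⟩ := List.pairwise_cons.mp hs
    rw [List.pairwise_cons, ih hs']
    constructor
    · rintro ⟨hh, hall⟩ a ha b hb hab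
      rcases List.mem_cons.mp ha with rfl | ha' <;> rcases List.mem_cons.mp hb with rfl | hb'
      · omega
      · exact hh b hb'
      · exact absurd hab (by have := hhead a ha'; omega)
      · exact hall a ha' b hb' hab
    · intro h
      refine ⟨fun b hb => h p (by simp) b (by simp [hb]) (hhead b hb), ?_⟩
      intro a ha b hb hab
      exact h a (by simp [ha]) b (by simp [hb]) hab

-- the slice-membership test of B, characterised by an index
theorem contains_slice_iff (nums : List Int) (k i : Int) (hi : 0 ≤ i) :
    ((PySem.List.slice nums (some (i + 1)) (some (i + 1 + max k 0))).contains 1 = true) ↔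
      ∃ j : Int, i < j ∧ j - i ≤ k ∧ j < nums.length ∧ 0 ≤ j ∧ PySem.List.pyGetD nums j 0 = 1 := by
  rw [List.contains_iff_mem,
    PySem.List.slice_toNat nums (by omega) (by omega),
    List.mem_iff_getElem]
  constructor
  · rintro ⟨u, hu, hget⟩
    rw [List.getElem_take, List.getElem_drop] at hget
    simp only [List.length_take, List.length_drop, lt_min_iff] at hu
    refine ⟨((i + 1).toNat + u : Nat), by omega, by omega, by omega, by omega, ?_⟩
    rw [PySem.List.pyGetD_eq_getElem _ _ (by omega) (by omega)]
    simpa only [Int.toNat_natCast] using hget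
  · rintro ⟨j, hij, hjk, hjn, hj0, hget⟩
    rw [PySem.List.pyGetD_eq_getElem _ _ hj0 hjn] at hget
    refine ⟨(j - i - 1).toNat, ?_, ?_⟩
    · simp only [List.length_take, List.length_drop, lt_min_iff]
      omega
    · rw [List.getElem_take, List.getElem_drop]
      have : (i + 1).toNat + (j - i - 1).toNat = j.toNat := by omega
      simp only [this]
      exact hget

-- B's loop is an all-quantifier over its index list
theorem kLengthApartAltGo_eq_all (nums : List Int) (k : Int) (L : List Int) :
    kLengthApartAltGo nums k L = true ↔
      ∀ i ∈ L, ¬(PySem.List.pyGetD nums i 0 = 1 ∧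
        (PySem.List.slice nums (some (i + 1)) (some (i + 1 + max k 0))).contains 1 = true) := by
  induction L with
  | nil => simp [kLengthApartAltGo]
  | cons i rest ih =>
    unfold kLengthApartAltGo
    by_cases h : PySem.List.pyGetD nums i 0 = 1 ∧
        (PySem.List.slice nums (some (i + 1)) (some (i + 1 + max k 0))).contains 1
    · simp only [if_pos h]
      simp only [List.mem_cons]
      constructor
      · intro hfalse; exact absurd hfalse (by simp)
      · intro hall; exact absurd ⟨h.1, h.2⟩ (hall i (Or.inl rfl))
    · simp only [if_neg h, ih, List.mem_cons]
      constructor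
      · rintro hall j (rfl | hj)
        · exact h
        · exact hall j hj
      · intro hall j hj; exact hall j (Or.inr hj)

theorem kLengthApart_iff (nums : List Int) (k : Int) :
    kLengthApart nums k = true ↔ (onesPos nums).Pairwise (fun p q => k < q - p) := by
  rw [kLengthApart, kLengthApartLoop_eq_gaps]
  show gapsApart k (onesPos nums) = true ↔ _
  rw [gapsApart_eq_chain, chain_iff_pairwise_gap k _ (sorted_onesPos nums)]

theorem kLengthApart_alt_iff (nums : List Int) (k : Int) :
    kLengthApart_alt nums k = true ↔ (onesPos nums).Pairwise (fun p q => k < q - p) := by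
  rw [kLengthApart_alt, kLengthApartAltGo_eq_all,
    pairwise_iff_forall_lt k _ (sorted_onesPos nums)]
  constructor
  · intro hall a ha b hb hab
    have ha' := (mem_onesPos nums a).mp ha
    have hb' := (mem_onesPos nums b).mp hb
    by_contra hk
    refine hall a ?_ ⟨ha'.2.2, ?_⟩
    · rw [PySem.List.mem_pyRange_one]; omega
    · rw [contains_slice_iff nums k a ha'.1]
      exact ⟨b, hab, by omega, hb'.2.1, hb'.1, hb'.2.2⟩
  · rintro hall i hi ⟨h1, hc⟩
    have hi' := PySem.List.mem_pyRange_one.mp hi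
    obtain ⟨j, hij, hjk, hjn, hj0, hj1⟩ := (contains_slice_iff nums k i hi'.1).mp hc
    have := hall i ((mem_onesPos nums i).mpr ⟨hi'.1, by simpa using hi'.2, h1⟩)
      j ((mem_onesPos nums j).mpr ⟨hj0, hjn, hj1⟩) hij
    omega

-- ===== VERDICT (by name: the statement is the Claim_ definition above) =====
theorem kLengthApart_spec : Claim_equal_kLengthApart := by
  intro nums k _
  unfold Spec_kLengthApart
  rw [Bool.eq_iff_iff, kLengthApart_iff, kLengthApart_alt_iff]
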